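-- pv_equiv track=rewrite | github.com/sultanowskii/itmo-edu | discrete-maths/cw1/part1/part1_exp_smp.py | multiply_expressions
-- ===== SOURCE A (Python) =====
-- def remove_duplicates(data: list[set[str]]) -> list[set[str]]:
--     """Remove duplicates."""
--     res = []
--     for elem in data:
--         if elem not in res:
--             res.append(elem)
--     return res
--
-- def remove_extended_ones(data: list[set[str]]) -> list[set[str]]:
--     """Remove extended terms."""
--     res = []
--
--     for i in range(len(data)):
--         ch = True
--         for j in range(len(data)):
--             if i == j:
--                 continue
--             if data[j].issubset(data[i]):
--                 ch = False
--                 break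
--         if ch:
--             res.append(data[i].copy())
--
--     return res
--
-- def multiply_expressions(data: list[list[set[str]]]) -> list[set]:
--     """Multiply expressions."""
--     prev = data[0]
--     current = []
--
--     for i in range(1, len(data)):
--         for elem1 in prev:
--             for elem2 in data[i]:
--                 current.append(elem1.union(elem2))
--         prev = current
--         prev = remove_duplicates(prev)
--         prev = remove_extended_ones(prev)
--         current = []
--
--     return prev
-- ===== SOURCE B (Python) =====
-- def multiply_expressions(data: list[list[set[str]]]) -> list[set]:
--     """Multiply expressions: fold the factors, pruning each partial product by
--     dedup (hash set of frozensets) and a size-ascending minimal-set sweep."""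
--     prev = data[0]
--     for i in range(1, len(data)):
--         prod = [a | b for a in prev for b in data[i]]
--         # first-occurrence dedup via a hash set of frozensets
--         dedup = []
--         seen = set()
--         for s in prod:
--             k = frozenset(s)
--             if k not in seen:
--                 seen.add(k)
--                 dedup.append(s)
--         # absorption pruning: sweep indices by ascending cardinality; a set is
--         # minimal iff no already-accepted (strictly smaller) set is its subset
--         order = sorted(range(len(dedup)), key=lambda j: len(dedup[j]))
--         keep = set()
--         accepted = []
--         for j in order:
--             s = dedup[j]
--             if not any(t <= s for t in accepted):
--                 keep.add(j)
--                 accepted.append(s)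
--         prev = [dedup[j].copy() for j in range(len(dedup)) if j in keep]
--     return prev
-- ===== Notes on version B (the rewrite author's own statement) =====
-- stated objective: alternative
-- what changed: The all-pairs O(n^2) absorption scan is replaced by a sort-by-cardinality sweep that accepts a set iff no already-accepted minimal set is its subset (verdicts mapped back to original order), and the dedup's O(n) list-membership scan is replaced by a hash set of frozensets.
import Mathlib
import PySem

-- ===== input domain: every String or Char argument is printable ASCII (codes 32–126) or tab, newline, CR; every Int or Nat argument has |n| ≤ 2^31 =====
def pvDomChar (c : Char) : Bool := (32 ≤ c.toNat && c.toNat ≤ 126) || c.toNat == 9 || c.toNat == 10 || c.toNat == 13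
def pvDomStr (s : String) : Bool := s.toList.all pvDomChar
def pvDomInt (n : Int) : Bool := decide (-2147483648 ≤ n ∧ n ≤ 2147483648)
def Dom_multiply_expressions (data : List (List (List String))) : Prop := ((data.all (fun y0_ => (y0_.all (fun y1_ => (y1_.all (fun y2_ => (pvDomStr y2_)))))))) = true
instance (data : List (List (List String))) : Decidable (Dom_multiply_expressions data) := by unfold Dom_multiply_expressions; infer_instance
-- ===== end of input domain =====

-- B replaces A's all-pairs absorption scan by a sort-by-cardinality sweep against the
-- already-accepted minimal sets, and the dedup's list scan by a hash-set membership test;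
-- an alternative decomposition (no speed claim).

-- ===== PORT A =====
-- remove_duplicates: 'elem not in res' is Python list membership by set equality (PySem.Set.equal)
def pvDedupA (data : List (List String)) : List (List String) :=
  data.foldl (fun res elem =>
    if res.any (fun r => PySem.Set.equal elem r) then res else res ++ [elem]) []

-- remove_extended_ones: the inner flag-and-break loop over j is the short-circuiting .all
def pvRee (L : List (List String)) : List (List String) :=
  (List.range L.length).foldl (fun res i =>
    let ch := (List.range L.length).all (fun j =>
      decide (j = i) || !PySem.Set.issubset (L.getD j []) (L.getD i []))
    if ch then res ++ [L.getD i []] else res) []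

def multiply_expressions (data : List (List (List String))) : List (List String) :=
  match data with
  | [] => []   -- unreachable under Pre_: Python raises IndexError on data[0]
  | d0 :: _ =>
    (List.range' 1 (data.length - 1)).foldl (fun prev i =>
      let current := prev.foldl (fun cur e1 =>
        (data.getD i []).foldl (fun cur e2 => cur ++ [PySem.Set.union e1 e2]) cur) []
      pvRee (pvDedupA current)) d0

-- ===== PORT B =====
-- dedup with a separate 'seen' set (Python: hash set of frozensets; frozenset == is set equality)
def pvDedupB (xs : List (List String)) : List (List String) :=
  (xs.foldl (fun (st : List (List String) × List (List String)) s =>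
      if st.1.any (fun k => PySem.Set.equal s k) then st
      else (st.1 ++ [s], st.2 ++ [s])) ([], [])).2

-- the size-ascending sweep: state = (kept indices, accepted minimal sets)
def pvSweep (L : List (List String)) (order : List Nat) : List Nat × List (List String) :=
  order.foldl (fun st j =>
    let s := L.getD j []
    if st.2.any (fun t => PySem.Set.issubset t s) then st
    else (st.1 ++ [j], st.2 ++ [s])) ([], [])

def pvReeB (L : List (List String)) : List (List String) :=
  let order := PySem.List.sorted (List.range L.length) (fun j => (L.getD j []).length)
  let keep := (pvSweep L order).1
  (List.range L.length).filterMap (fun j =>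
    if keep.contains j then some (L.getD j []) else none)

def multiply_expressions_alt (data : List (List (List String))) : List (List String) :=
  match data with
  | [] => []   -- unreachable under Pre_: Python raises IndexError on data[0]
  | d0 :: _ =>
    (List.range' 1 (data.length - 1)).foldl (fun prev i =>
      let prod := prev.flatMap (fun a => (data.getD i []).map (fun b => PySem.Set.union a b))
      pvReeB (pvDedupB prod)) d0

-- ===== PRECONDITION & SPEC =====
-- Pre_ excludes the empty list (Python raises IndexError on data[0]) and inner lists with
-- duplicate strings, which are not valid encodings of Python sets (a Python set value is
-- always encoded as a duplicate-free list under the type convention).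
def Pre_multiply_expressions (data : List (List (List String))) : Prop :=
  data ≠ [] ∧ ∀ g ∈ data, ∀ s ∈ g, s.Nodup

instance (data : List (List (List String))) : Decidable (Pre_multiply_expressions data) := by
  unfold Pre_multiply_expressions; infer_instance

def pvWitness_multiply_expressions : List (List (List String)) :=
  [[["a"], ["b"]], [["b", "c"]]]

def Spec_multiply_expressions (data : List (List (List String))) (out : List (List String)) : Prop := out = multiply_expressions_alt data
instance (data : List (List (List String))) (out : List (List String)) : Decidable (Spec_multiply_expressions data out) := by unfold Spec_multiply_expressions; infer_instance

-- ===== CLAIM (what is proved, stated in full; the proofs are below) =====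
def Claim_equal_multiply_expressions : Prop := ∀ (data : List (List (List String))), Dom_multiply_expressions data → Pre_multiply_expressions data → Spec_multiply_expressions data (multiply_expressions data)

-- ===== LEMMAS AND PROOFS =====

-- "index i holds a minimal set": no other index carries a subset of L[i]
def pvMin (L : List (List String)) (i : Nat) : Prop :=
  ∀ j, j < L.length → j ≠ i → ¬ (PySem.Set.issubset (L.getD j []) (L.getD i []) = true)

-- the Boolean check A computes for index i (definitionally A's inner loop)
def pvMinb (L : List (List String)) (i : Nat) : Bool :=
  (List.range L.length).all (fun j =>
    decide (j = i) || !PySem.Set.issubset (L.getD j []) (L.getD i []))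

theorem pvEqual_comm (a b : List String) :
    (PySem.Set.equal a b = true) ↔ (PySem.Set.equal b a = true) := by
  rw [PySem.Set.equal_iff, PySem.Set.equal_iff]
  constructor <;> (intro h x; exact (h x).symm)

theorem pvIssubset_refl (s : List String) : PySem.Set.issubset s s = true := by
  rw [PySem.Set.issubset_iff]; intro x hx; exact hx

theorem pvIssubset_trans (a b c : List String)
    (h1 : PySem.Set.issubset a b = true) (h2 : PySem.Set.issubset b c = true) :
    PySem.Set.issubset a c = true := by
  rw [PySem.Set.issubset_iff] at *
  intro x hx; exact h2 x (h1 x hx)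

theorem pvGetD_mem (L : List (List String)) (i : Nat) (h : i < L.length) : L.getD i [] ∈ L := by
  rw [List.getD_eq_getElem?_getD, List.getElem?_eq_getElem h]
  exact List.getElem_mem h

theorem pvMinb_iff (L : List (List String)) (i : Nat) : pvMinb L i = true ↔ pvMin L i := by
  unfold pvMinb
  rw [List.all_eq_true]
  constructor
  · intro h j hj hji hsub
    have h' := h j (List.mem_range.2 hj)
    simp only [Bool.or_eq_true, decide_eq_true_eq, Bool.not_eq_true'] at h'
    rcases h' with h' | h'
    · exact hji h'
    · rw [hsub] at h'
      simp at h'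
  · intro h j hj
    rw [List.mem_range] at hj
    by_cases hji : j = i
    · simp [hji]
    · have h' := h j hj hji
      simp only [Bool.or_eq_true, decide_eq_true_eq, Bool.not_eq_true']
      right
      cases hs : PySem.Set.issubset (L.getD j []) (L.getD i []) with
      | true => exact absurd hs h'
      | false => rfl

theorem pvMinb_true_of (L : List (List String)) (i : Nat) (h : pvMin L i) : pvMinb L i = true :=
  (pvMinb_iff L i).2 h

theorem pvMinb_false_of (L : List (List String)) (i : Nat) (h : ¬ pvMin L i) : pvMinb L i = false := by
  cases hb : pvMinb L i with
  | true => exact absurd ((pvMinb_iff L i).1 hb) h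
  | false => rfl

-- strict subset between duplicate-free lists shrinks the length
theorem pvSubset_length_lt (a b : List String) (ha : a.Nodup) (hb : b.Nodup)
    (hab : PySem.Set.issubset a b = true) (hne : ¬ PySem.Set.equal a b = true) :
    a.length < b.length := by
  rw [PySem.Set.issubset_iff] at hab
  have hss : a.toFinset ⊂ b.toFinset := by
    rw [Finset.ssubset_def]
    constructor
    · intro x hx
      rw [List.mem_toFinset] at hx ⊢
      exact hab x hx
    · intro hba
      apply hne
      rw [PySem.Set.equal_iff]
      intro x
      constructor
      · exact hab x
      · intro hxb
        exact List.mem_toFinset.1 (hba (List.mem_toFinset.2 hxb))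
  have hc := Finset.card_lt_card hss
  rwa [List.card_toFinset, List.card_toFinset, ha.dedup, hb.dedup] at hc

theorem pvPairwise_getD_ne (L : List (List String))
    (hpw : L.Pairwise (fun a b => ¬ (PySem.Set.equal a b = true)))
    (m i : Nat) (hm : m < L.length) (hi : i < L.length) (hne : m ≠ i) :
    ¬ PySem.Set.equal (L.getD m []) (L.getD i []) = true := by
  rw [List.getD_eq_getElem _ _ hm, List.getD_eq_getElem _ _ hi]
  rw [List.pairwise_iff_getElem] at hpw
  rcases Nat.lt_or_ge m i with h | h
  · exact hpw m i hm hi h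
  · have hlt : i < m := Nat.lt_of_le_of_ne h (fun e => hne e.symm)
    intro he
    exact hpw i m hi hm hlt ((pvEqual_comm _ _).1 he)

-- ===== dedup lemmas =====

theorem pvDedupB_aux (xs : List (List String)) :
    ∀ (r : List (List String)),
    (xs.foldl (fun (st : List (List String) × List (List String)) s =>
        if st.1.any (fun k => PySem.Set.equal s k) then st
        else (st.1 ++ [s], st.2 ++ [s])) (r, r)).2
    = xs.foldl (fun res elem =>
        if res.any (fun r' => PySem.Set.equal elem r') then res else res ++ [elem]) r := by
  induction xs with
  | nil => intro r; rfl
  | cons s xs ih =>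
    intro r
    simp only [List.foldl_cons]
    by_cases h : r.any (fun k => PySem.Set.equal s k) = true
    · rw [if_pos h, if_pos h]; exact ih r
    · rw [if_neg h, if_neg h]; exact ih (r ++ [s])

theorem dedupB_eq_dedupA (xs : List (List String)) : pvDedupB xs = pvDedupA xs := by
  unfold pvDedupB pvDedupA
  exact pvDedupB_aux xs []

theorem pvDedupA_aux_mem (xs : List (List String)) :
    ∀ (res : List (List String)) (y : List String),
    y ∈ xs.foldl (fun res elem =>
        if res.any (fun r' => PySem.Set.equal elem r') then res else res ++ [elem]) res →
    y ∈ res ∨ y ∈ xs := by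
  induction xs with
  | nil => intro res y h; exact Or.inl h
  | cons s xs ih =>
    intro res y h
    simp only [List.foldl_cons] at h
    by_cases hc : res.any (fun r' => PySem.Set.equal s r') = true
    · rw [if_pos hc] at h
      rcases ih res y h with h' | h'
      · exact Or.inl h'
      · exact Or.inr (List.mem_cons_of_mem _ h')
    · rw [if_neg hc] at h
      rcases ih (res ++ [s]) y h with h' | h'
      · rcases List.mem_append.1 h' with h'' | h''
        · exact Or.inl h''
        · exact Or.inr (List.mem_cons.2 (Or.inl (List.mem_singleton.1 h'')))
      · exact Or.inr (List.mem_cons_of_mem _ h')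

theorem mem_dedupA (xs : List (List String)) (y : List String) (h : y ∈ pvDedupA xs) : y ∈ xs := by
  rcases pvDedupA_aux_mem xs [] y h with h' | h'
  · exact absurd h' (by simp)
  · exact h'

theorem pvDedupA_aux_pw (xs : List (List String)) :
    ∀ (res : List (List String)),
    res.Pairwise (fun a b => ¬ (PySem.Set.equal a b = true)) →
    (xs.foldl (fun res elem =>
        if res.any (fun r' => PySem.Set.equal elem r') then res else res ++ [elem]) res).Pairwise
      (fun a b => ¬ (PySem.Set.equal a b = true)) := by
  induction xs with
  | nil => intro res h; exact h
  | cons s xs ih =>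
    intro res hres
    simp only [List.foldl_cons]
    by_cases hc : res.any (fun r' => PySem.Set.equal s r') = true
    · rw [if_pos hc]; exact ih res hres
    · rw [if_neg hc]
      apply ih
      rw [List.pairwise_append]
      refine ⟨hres, List.pairwise_singleton _ _, ?_⟩
      intro a ha b hb
      rw [List.mem_singleton] at hb
      subst hb
      rw [List.any_eq_true] at hc
      push_neg at hc
      intro he
      exact hc a ha ((pvEqual_comm _ _).1 he)

theorem pairwise_dedupA (xs : List (List String)) :
    (pvDedupA xs).Pairwise (fun a b => ¬ (PySem.Set.equal a b = true)) := by
  unfold pvDedupA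
  exact pvDedupA_aux_pw xs [] List.Pairwise.nil

-- ===== generic fold shape =====

theorem pvFoldl_if_append_eq_filterMap {α β : Type} (p : α → Bool) (f : α → β) :
    ∀ (l : List α) (acc : List β),
    l.foldl (fun res i => if p i then res ++ [f i] else res) acc
      = acc ++ l.filterMap (fun i => if p i then some (f i) else none) := by
  intro l
  induction l with
  | nil => intro acc; simp
  | cons i l ih =>
    intro acc
    by_cases h : p i = true
    · simp [h, ih, List.append_assoc]
    · simp [h, ih]

-- ===== existence of an absorbing minimal index =====

theorem pvNotMin (L : List (List String)) (i : Nat) (h : ¬ pvMin L i) :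
    ∃ j, j < L.length ∧ j ≠ i ∧ PySem.Set.issubset (L.getD j []) (L.getD i []) = true := by
  unfold pvMin at h
  push_neg at h
  exact h

theorem pvExists_min (L : List (List String))
    (hnd : ∀ s ∈ L, s.Nodup)
    (hpw : L.Pairwise (fun a b => ¬ (PySem.Set.equal a b = true))) :
    ∀ (fuel : Nat) (i : Nat), i < L.length → (L.getD i []).length ≤ fuel →
    ∃ m, m < L.length ∧ pvMin L m ∧ PySem.Set.issubset (L.getD m []) (L.getD i []) = true := by
  intro fuel
  induction fuel with
  | zero =>
    intro i hi hlen
    by_cases h : pvMin L i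
    · exact ⟨i, hi, h, pvIssubset_refl _⟩
    · obtain ⟨j, hj, hji, hsub⟩ := pvNotMin L i h
      have hne := pvPairwise_getD_ne L hpw j i hj hi hji
      have := pvSubset_length_lt _ _ (hnd _ (pvGetD_mem L j hj)) (hnd _ (pvGetD_mem L i hi)) hsub hne
      omega
  | succ n ih =>
    intro i hi hlen
    by_cases h : pvMin L i
    · exact ⟨i, hi, h, pvIssubset_refl _⟩
    · obtain ⟨j, hj, hji, hsub⟩ := pvNotMin L i h
      have hne := pvPairwise_getD_ne L hpw j i hj hi hji
      have hlt := pvSubset_length_lt _ _ (hnd _ (pvGetD_mem L j hj)) (hnd _ (pvGetD_mem L i hi)) hsub hne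
      obtain ⟨m, hm, hmmin, hmsub⟩ := ih j hj (by omega)
      exact ⟨m, hm, hmmin, pvIssubset_trans _ _ _ hmsub hsub⟩

-- ===== the sweep computes exactly the minimal indices =====

theorem pvSweep_aux (L : List (List String))
    (hnd : ∀ s ∈ L, s.Nodup)
    (hpw : L.Pairwise (fun a b => ¬ (PySem.Set.equal a b = true)))
    (o : List Nat)
    (ho1 : ∀ j ∈ o, j < L.length)
    (ho2 : o.Nodup)
    (ho3 : o.Pairwise (fun a b => (L.getD a []).length ≤ (L.getD b []).length))
    (hoc : ∀ j, j < L.length → j ∈ o) :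
    ∀ (rest p : List Nat), o = p ++ rest →
    rest.foldl (fun st j =>
        if st.2.any (fun t => PySem.Set.issubset t (L.getD j [])) then st
        else (st.1 ++ [j], st.2 ++ [L.getD j []]))
      (p.filter (pvMinb L), (p.filter (pvMinb L)).map (fun j => L.getD j []))
    = (o.filter (pvMinb L), (o.filter (pvMinb L)).map (fun j => L.getD j [])) := by
  intro rest
  induction rest with
  | nil =>
    intro p hp
    simp at hp
    subst hp
    rfl
  | cons i rest' ih =>
    intro p hp
    have hio : i ∈ o := by rw [hp]; simp
    have hiL : i < L.length := ho1 i hio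
    have hinp : i ∉ p := by
      intro hip
      rw [hp] at ho2
      rcases List.nodup_append.1 ho2 with ⟨-, -, hdis⟩
      have hmem : i ∈ i :: rest' := by simp
      first
      | exact hdis hip hmem
      | exact hdis _ hip _ hmem rfl
      | exact hdis hip hmem rfl
      | exact List.disjoint_left.1 hdis hip hmem
      | exact hdis hmem hip
    simp only [List.foldl_cons]
    by_cases hmin : pvMin L i
    · -- no accepted set absorbs a minimal one: the branch appends
      have hdec : ((p.filter (pvMinb L)).map (fun j => L.getD j [])).any
          (fun t => PySem.Set.issubset t (L.getD i [])) = false := by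
        rw [List.any_eq_false]
        intro t ht
        rw [List.mem_map] at ht
        obtain ⟨j, hjf, rfl⟩ := ht
        have hjp : j ∈ p := (List.mem_filter.1 hjf).1
        have hjne : j ≠ i := fun e => hinp (e ▸ hjp)
        have hjL : j < L.length := ho1 j (by rw [hp]; exact List.mem_append.2 (Or.inl hjp))
        exact hmin j hjL hjne
      rw [hdec]
      simp only [Bool.false_eq_true, if_false]
      have hfi : (p ++ [i]).filter (pvMinb L) = p.filter (pvMinb L) ++ [i] := by
        rw [List.filter_append]
        simp [pvMinb_true_of L i hmin]
      have hrec := ih (p ++ [i]) (by rw [hp]; simp)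
      rw [hfi, List.map_append] at hrec
      exact hrec
    · -- some accepted (strictly smaller) minimal set absorbs L[i]
      obtain ⟨m, hmL, hmmin, hmsub⟩ :=
        pvExists_min L hnd hpw (L.getD i []).length i hiL le_rfl
      have hmne : m ≠ i := fun e => hmin (e ▸ hmmin)
      have hneq := pvPairwise_getD_ne L hpw m i hmL hiL hmne
      have hlt : (L.getD m []).length < (L.getD i []).length :=
        pvSubset_length_lt _ _ (hnd _ (pvGetD_mem L m hmL)) (hnd _ (pvGetD_mem L i hiL)) hmsub hneq
      have hmo : m ∈ o := hoc m hmL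
      have hmp : m ∈ p := by
        rw [hp] at hmo
        rcases List.mem_append.1 hmo with h' | h'
        · exact h'
        · rcases List.mem_cons.1 h' with h'' | h''
          · exact absurd h'' hmne
          · -- m after i in sorted order: length of L[i] ≤ length of L[m], contradiction
            rw [hp] at ho3
            have hpair := (List.pairwise_append.1 ho3).2.1
            have := (List.pairwise_cons.1 hpair).1 m h''
            omega
      have hmf : m ∈ p.filter (pvMinb L) :=
        List.mem_filter.2 ⟨hmp, pvMinb_true_of L m hmmin⟩
      have hdec : ((p.filter (pvMinb L)).map (fun j => L.getD j [])).any
          (fun t => PySem.Set.issubset t (L.getD i [])) = true :=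
        List.any_eq_true.2 ⟨L.getD m [], List.mem_map.2 ⟨m, hmf, rfl⟩, hmsub⟩
      rw [hdec]
      simp only [if_true]
      have hfi : (p ++ [i]).filter (pvMinb L) = p.filter (pvMinb L) := by
        rw [List.filter_append]
        simp [pvMinb_false_of L i hmin]
      have hrec := ih (p ++ [i]) (by rw [hp]; simp)
      rw [hfi] at hrec
      exact hrec

-- ===== the two prunings agree on a dedup'd list =====

theorem reeB_eq_ree (L : List (List String))
    (hnd : ∀ s ∈ L, s.Nodup)
    (hpw : L.Pairwise (fun a b => ¬ (PySem.Set.equal a b = true))) :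
    pvReeB L = pvRee L := by
  set o := PySem.List.sorted (List.range L.length) (fun j => (L.getD j []).length) with ho_def
  have operm : o.Perm (List.range L.length) := PySem.List.sorted_perm _ _ _
  have ho1 : ∀ j ∈ o, j < L.length := by
    intro j hj
    exact List.mem_range.1 (operm.mem_iff.1 hj)
  have ho2 : o.Nodup := operm.nodup_iff.2 (List.nodup_range)
  have ho3 : o.Pairwise (fun a b => (L.getD a []).length ≤ (L.getD b []).length) :=
    PySem.List.sorted_pairwise _ _
  have hoc : ∀ j, j < L.length → j ∈ o := by
    intro j hj
    exact operm.mem_iff.2 (List.mem_range.2 hj)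
  have hsweep : pvSweep L o
      = (o.filter (pvMinb L), (o.filter (pvMinb L)).map (fun j => L.getD j [])) := by
    have h0 := pvSweep_aux L hnd hpw o ho1 ho2 ho3 hoc o [] (by simp)
    simpa [pvSweep] using h0
  have hB : pvReeB L = (List.range L.length).filterMap (fun j =>
      if ((pvSweep L o).1).contains j then some (L.getD j []) else none) := by
    rw [ho_def]
    rfl
  have hA : pvRee L = (List.range L.length).foldl (fun res i =>
      if pvMinb L i then res ++ [L.getD i []] else res) [] := rfl
  rw [hA, hB, hsweep]
  have h1 : (List.range L.length).filterMap (fun j =>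
      if (o.filter (pvMinb L)).contains j then some (L.getD j []) else none)
      = (List.range L.length).filterMap (fun j =>
      if pvMinb L j then some (L.getD j []) else none) := by
    apply List.filterMap_congr
    intro j hj
    have hjL := List.mem_range.1 hj
    by_cases hm : pvMinb L j = true
    · rw [hm]
      have : (o.filter (pvMinb L)).contains j = true := by
        rw [List.contains_iff_mem]
        exact List.mem_filter.2 ⟨hoc j hjL, hm⟩
      rw [this]
    · have hmf : pvMinb L j = false := by
        cases hb : pvMinb L j with
        | true => exact absurd hb hm
        | false => rfl
      have : (o.filter (pvMinb L)).contains j = false := by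
        cases hb : (o.filter (pvMinb L)).contains j with
        | true =>
          rw [List.contains_iff_mem] at hb
          exact absurd (List.mem_filter.1 hb).2 hm
        | false => rfl
      rw [this, hmf]
  rw [h1]
  rw [pvFoldl_if_append_eq_filterMap (pvMinb L) (fun j => L.getD j []) (List.range L.length) []]
  rw [List.nil_append]

-- ree output members come from the list
theorem mem_ree (L : List (List String)) (y : List String) (h : y ∈ pvRee L) : y ∈ L := by
  have hA : pvRee L = (List.range L.length).foldl (fun res i =>
      if pvMinb L i then res ++ [L.getD i []] else res) [] := rfl
  rw [hA, pvFoldl_if_append_eq_filterMap, List.nil_append, List.mem_filterMap] at h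
  obtain ⟨i, hi, hsome⟩ := h
  by_cases hc : pvMinb L i = true
  · rw [if_pos hc] at hsome
    cases hsome
    exact pvGetD_mem L i (List.mem_range.1 hi)
  · rw [if_neg hc] at hsome
    cases hsome

-- ===== the step functions =====

def pvStepA (data : List (List (List String))) : List (List String) → Nat → List (List String) :=
  fun prev i =>
    pvRee (pvDedupA (prev.foldl (fun cur e1 =>
      (data.getD i []).foldl (fun cur e2 => cur ++ [PySem.Set.union e1 e2]) cur) []))

def pvStepB (data : List (List (List String))) : List (List String) → Nat → List (List String) :=
  fun prev i =>
    pvReeB (pvDedupB (prev.flatMap (fun a => (data.getD i []).map (fun b => PySem.Set.union a b))))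

theorem pvFoldl_append_map {α β : Type} (f : α → β) :
    ∀ (l : List α) (acc : List β),
    l.foldl (fun c x => c ++ [f x]) acc = acc ++ l.map f := by
  intro l
  induction l with
  | nil => intro acc; simp
  | cons x l ih => intro acc; simp [ih, List.append_assoc]

theorem pvCurrent_eq_prod (data : List (List (List String))) (prev : List (List String)) (i : Nat) :
    prev.foldl (fun cur e1 =>
      (data.getD i []).foldl (fun cur e2 => cur ++ [PySem.Set.union e1 e2]) cur) []
    = prev.flatMap (fun a => (data.getD i []).map (fun b => PySem.Set.union a b)) := by
  rw [PySem.List.foldl_congr_mem prev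
    (fun cur e1 => (data.getD i []).foldl (fun cur e2 => cur ++ [PySem.Set.union e1 e2]) cur)
    (fun cur e1 => cur ++ (data.getD i []).map (fun b => PySem.Set.union e1 b)) []
    (fun acc x _ => pvFoldl_append_map _ _ acc)]
  exact PySem.List.foldl_append_eq_flatMap _ _ []

theorem pvStep_eq (data : List (List (List String))) (prev : List (List String)) (i : Nat)
    (hprev : ∀ s ∈ prev, s.Nodup) :
    pvStepA data prev i = pvStepB data prev i := by
  unfold pvStepA pvStepB
  rw [pvCurrent_eq_prod]
  rw [dedupB_eq_dedupA]
  set prod := prev.flatMap (fun a => (data.getD i []).map (fun b => PySem.Set.union a b)) with hprod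
  have hndp : ∀ s ∈ pvDedupA prod, s.Nodup := by
    intro s hs
    have hmem := mem_dedupA prod s hs
    rw [hprod, List.mem_flatMap] at hmem
    obtain ⟨a, ha, hs'⟩ := hmem
    rw [List.mem_map] at hs'
    obtain ⟨b, _, rfl⟩ := hs'
    exact PySem.Set.nodup_union _ _ (hprev a ha)
  exact (reeB_eq_ree (pvDedupA prod) hndp (pairwise_dedupA prod)).symm

theorem pvStepA_nodup (data : List (List (List String))) (prev : List (List String)) (i : Nat)
    (hprev : ∀ s ∈ prev, s.Nodup) :
    ∀ s ∈ pvStepA data prev i, s.Nodup := by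
  intro s hs
  unfold pvStepA at hs
  rw [pvCurrent_eq_prod] at hs
  have h1 := mem_ree _ _ hs
  have h2 := mem_dedupA _ _ h1
  rw [List.mem_flatMap] at h2
  obtain ⟨a, ha, hs'⟩ := h2
  rw [List.mem_map] at hs'
  obtain ⟨b, _, rfl⟩ := hs'
  exact PySem.Set.nodup_union _ _ (hprev a ha)

theorem pvOuter (data : List (List (List String))) :
    ∀ (l : List Nat) (prev : List (List String)),
    (∀ s ∈ prev, s.Nodup) →
    l.foldl (pvStepA data) prev = l.foldl (pvStepB data) prev := by
  intro l
  induction l with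
  | nil => intro prev _; rfl
  | cons i l ih =>
    intro prev hprev
    simp only [List.foldl_cons]
    rw [← pvStep_eq data prev i hprev]
    exact ih (pvStepA data prev i) (pvStepA_nodup data prev i hprev)

theorem multiply_expressions_spec' (data : List (List (List String)))
    (hpre : Pre_multiply_expressions data) :
    multiply_expressions data = multiply_expressions_alt data := by
  obtain ⟨hne, hnd⟩ := hpre
  match data with
  | [] => exact absurd rfl hne
  | d0 :: rest =>
    show (List.range' 1 ((d0 :: rest).length - 1)).foldl (pvStepA (d0 :: rest)) d0
        = (List.range' 1 ((d0 :: rest).length - 1)).foldl (pvStepB (d0 :: rest)) d0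
    exact pvOuter (d0 :: rest) _ d0 (fun s hs => hnd d0 (by simp) s hs)

-- ===== VERDICT (by name: the statement is the Claim_ definition above) =====
theorem multiply_expressions_spec : Claim_equal_multiply_expressions := by
  intro data _ hpre
  unfold Spec_multiply_expressions
  exact multiply_expressions_spec' data hpre
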